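-- pv_equiv track=rewrite | github.com/ondanieldev/ufmg-alc | src/vpls_opcionais/06.py | nome_mais_comum
-- ===== SOURCE A (Python) =====
-- def nome_mais_comum(names):
--     namesWithValues = []
--     for name in names:
--         for nameWithValue in namesWithValues:
--             if nameWithValue[0] == name:
--                 nameWithValue[1] += 1
--                 break
--         else:
--             namesWithValues.append([name, 1])
--
--     maxName = namesWithValues[0][0]
--     maxValue = namesWithValues[0][1]
--     for nameWithValue in namesWithValues:
--         if nameWithValue[1] > maxValue:
--             maxName = nameWithValue[0]
--             maxValue = nameWithValue[1]
--     return (maxName, maxValue)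
-- ===== SOURCE B (Python) =====
-- def nome_mais_comum(names):
--     # Peel-and-filter: repeatedly take the first remaining name, count its
--     # occurrences, then drop all of them; keep the best (strict > so the
--     # first-encountered name wins ties, as intended).
--     x = names[0]
--     best = (x, names.count(x))
--     remaining = [y for y in names if y != x]
--     while remaining:
--         x = remaining[0]
--         c = remaining.count(x)
--         if c > best[1]:
--             best = (x, c)
--         remaining = [y for y in remaining if y != x]
--     return best
-- ===== Notes on version B (the rewrite author's own statement) =====
-- stated objective: alternative
-- what changed: Replaces A's build-a-frequency-table-then-scan-for-the-max strategy with a peel-and-filter loop that never materialises a table: it repeatedly counts the first remaining name, removes all its occurrences, and keeps a running best with strict > so the first-encountered name wins ties.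
import Mathlib
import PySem

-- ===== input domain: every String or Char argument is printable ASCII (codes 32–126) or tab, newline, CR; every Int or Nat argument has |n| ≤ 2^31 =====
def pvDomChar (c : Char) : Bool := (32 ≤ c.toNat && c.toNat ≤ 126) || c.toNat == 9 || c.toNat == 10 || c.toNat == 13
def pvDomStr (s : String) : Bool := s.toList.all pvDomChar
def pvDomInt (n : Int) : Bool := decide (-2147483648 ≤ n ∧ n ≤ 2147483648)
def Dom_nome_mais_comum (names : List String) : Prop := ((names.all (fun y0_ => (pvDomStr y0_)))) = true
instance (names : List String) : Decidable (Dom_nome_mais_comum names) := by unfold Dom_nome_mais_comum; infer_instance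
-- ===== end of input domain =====

-- B replaces A's frequency-table-then-max strategy with a peel-and-filter loop
-- (count the first remaining name, drop its occurrences, keep the running best).

-- ===== PORT A =====
-- A's inner 'for … else append' loop: bump the first pair whose key equals name, else append [name, 1].
def pvBumpA : List (String × Int) → String → List (String × Int)
  | [], name => [(name, 1)]
  | (k, v) :: rest, name =>
      if k == name then (k, v + 1) :: rest else (k, v) :: pvBumpA rest name

def nome_mais_comum (names : List String) : String × Int :=
  -- first loop: build namesWithValues
  let table := names.foldl pvBumpA []
  -- namesWithValues[0] raises IndexError on empty input (excluded by Pre_)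
  let first := PySem.List.pyGetD table 0 ("", 0)
  -- second loop: running max with strict '>'
  table.foldl (fun (acc : String × Int) nv => if nv.2 > acc.2 then (nv.1, nv.2) else acc)
    (first.1, first.2)

-- ===== PORT B =====
-- the 'while remaining:' loop of Source B
def pvPeel (remaining : List String) (best : String × Int) : String × Int :=
  match remaining with
  | [] => best
  | x :: rest =>
      let c : Int := PySem.List.count (x :: rest) x
      let best' := if c > best.2 then (x, c) else best
      pvPeel ((x :: rest).filter (fun y => decide (y ≠ x))) best'
termination_by remaining.length
decreasing_by
  simp only [List.filter_cons, decide_not, ne_eq]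
  exact Nat.lt_succ_of_le (List.length_filter_le _ _)

def nome_mais_comum_alt (names : List String) : String × Int :=
  match names with
  | [] => ("", 0)   -- names[0] raises IndexError in Python; excluded by Pre_
  | x :: rest =>
      let best : String × Int := (x, PySem.List.count (x :: rest) x)
      pvPeel ((x :: rest).filter (fun y => decide (y ≠ x))) best

-- ===== PRECONDITION & SPEC =====
-- On the empty list both A and B raise IndexError; Pre_ excludes exactly that input.
def Pre_nome_mais_comum (names : List String) : Prop := names ≠ []
instance (names : List String) : Decidable (Pre_nome_mais_comum names) := by unfold Pre_nome_mais_comum; infer_instance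
def pvWitness_nome_mais_comum : List String := ["ana", "bob", "ana"]

def Spec_nome_mais_comum (names : List String) (out : String × Int) : Prop := out = nome_mais_comum_alt names
instance (names : List String) (out : String × Int) : Decidable (Spec_nome_mais_comum names out) := by unfold Spec_nome_mais_comum; infer_instance

-- ===== CLAIM =====
def Claim_equal_nome_mais_comum : Prop := ∀ (names : List String), Dom_nome_mais_comum names → Pre_nome_mais_comum names → Spec_nome_mais_comum names (nome_mais_comum names)

-- ===== LEMMAS AND PROOFS =====

-- Threading lemma: folding A's bump over l with (x, v) on top of the accumulator
-- bumps the head once per occurrence of x and threads everything else below it.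
theorem pvBump_thread (l : List String) (x : String) (v : Int) (acc : List (String × Int)) :
    l.foldl pvBumpA ((x, v) :: acc)
      = (x, v + (l.count x : Int)) :: (l.filter (fun y => decide (y ≠ x))).foldl pvBumpA acc := by
  induction l generalizing v acc with
  | nil => simp
  | cons n l ih =>
      simp only [List.foldl_cons]
      by_cases h : x = n
      · subst h
        have hb : pvBumpA ((x, v) :: acc) x = (x, v + 1) :: acc := by simp [pvBumpA]
        rw [hb, ih]
        simp only [List.count_cons_self, List.filter_cons, ne_eq]
        congr 2
        push_cast
        ring
      · have hb : pvBumpA ((x, v) :: acc) n = (x, v) :: pvBumpA acc n := by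
          simp [pvBumpA, h]
        rw [hb, ih]
        have hcnt : (n :: l).count x = l.count x := by simp [Ne.symm h]
        have hfil : (n :: l).filter (fun y => decide (y ≠ x))
            = n :: l.filter (fun y => decide (y ≠ x)) := by
          simp [Ne.symm h]
        rw [hcnt, hfil, List.foldl_cons]

-- A's second loop, as a named step function (used only by the proofs)
def pvStep (acc : String × Int) (nv : String × Int) : String × Int :=
  if nv.2 > acc.2 then (nv.1, nv.2) else acc

-- the head-count of a nonempty list, as an Int
theorem pvCount_head (x : String) (rest : List String) :
    (PySem.List.count (x :: rest) x : Int) = 1 + (rest.count x : Int) := by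
  rw [PySem.List.count_eq]
  simp [List.count_cons_self]
  ring

-- A's table of a nonempty list: head pair = (head, its total count), tail = table of the rest with the head filtered out
theorem pvTable_cons (x : String) (rest : List String) :
    (x :: rest).foldl pvBumpA []
      = (x, 1 + (rest.count x : Int))
          :: (rest.filter (fun y => decide (y ≠ x))).foldl pvBumpA [] := by
  rw [List.foldl_cons]
  have hb : pvBumpA [] x = [(x, (1 : Int))] := rfl
  rw [hb, pvBump_thread]

-- B's peel-and-filter loop computes exactly A's running max over A's table
theorem pvPeel_eq (n : Nat) : ∀ (l : List String), l.length ≤ n → ∀ (best : String × Int),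
    pvPeel l best = (l.foldl pvBumpA []).foldl pvStep best := by
  induction n with
  | zero =>
      intro l h best
      have : l = [] := List.eq_nil_of_length_eq_zero (Nat.le_zero.1 h)
      subst this
      simp [pvPeel]
  | succ n ih =>
      intro l h best
      match l with
      | [] => simp [pvPeel]
      | x :: rest =>
          have hfil : (x :: rest).filter (fun y => decide (y ≠ x))
              = rest.filter (fun y => decide (y ≠ x)) := by
            simp
          have hlen : (rest.filter (fun y => decide (y ≠ x))).length ≤ n :=
            le_trans (List.length_filter_le _ _) (Nat.succ_le_succ_iff.1 h)
          rw [pvPeel, hfil, ih _ hlen, pvTable_cons, List.foldl_cons]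
          congr 1
          simp only [pvStep, pvCount_head]

-- ===== VERDICT =====
theorem nome_mais_comum_spec : Claim_equal_nome_mais_comum := by
  intro names _ hpre
  match names with
  | [] => exact absurd rfl hpre
  | x :: rest =>
      show nome_mais_comum (x :: rest) = nome_mais_comum_alt (x :: rest)
      have hstep : (fun (acc : String × Int) (nv : String × Int) =>
          if nv.2 > acc.2 then (nv.1, nv.2) else acc) = pvStep := rfl
      simp only [nome_mais_comum, nome_mais_comum_alt, hstep]
      have hfil : (x :: rest).filter (fun y => decide (y ≠ x))
          = rest.filter (fun y => decide (y ≠ x)) := by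
        simp
      rw [pvTable_cons, hfil, pvPeel_eq (rest.filter (fun y => decide (y ≠ x))).length _ le_rfl,
        PySem.List.pyGetD_zero_cons, List.foldl_cons]
      congr 1
      simp [pvStep]
      omega
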